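-- pv_equiv track=rewrite | github.com/Mo-wo/python_projects | bleeper.py | bleeper
-- ===== SOURCE A (Python) =====
-- import string
--
-- def bleeper(rudeword):
--     pos = 0
--     for char in rudeword:
--         if char not in string.punctuation:
--             char = "*"
--         else:
--             char = char
--         rudeword = rudeword.replace(rudeword[pos], char)
--         pos += 1
--     return rudeword
-- ===== SOURCE B (Python) =====
-- import string
--
-- def bleeper(rudeword):
--     return "".join(c if c in string.punctuation else "*" for c in rudeword)
-- ===== Notes on version B (the rewrite author's own statement) =====
-- stated objective: faster
-- what changed: Replaces A's loop of repeated whole-string str.replace calls (quadratic, and relying on the subtle fact that the buggy-looking global replaces never corrupt the result) with a single per-character map joined once.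
import Mathlib
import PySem

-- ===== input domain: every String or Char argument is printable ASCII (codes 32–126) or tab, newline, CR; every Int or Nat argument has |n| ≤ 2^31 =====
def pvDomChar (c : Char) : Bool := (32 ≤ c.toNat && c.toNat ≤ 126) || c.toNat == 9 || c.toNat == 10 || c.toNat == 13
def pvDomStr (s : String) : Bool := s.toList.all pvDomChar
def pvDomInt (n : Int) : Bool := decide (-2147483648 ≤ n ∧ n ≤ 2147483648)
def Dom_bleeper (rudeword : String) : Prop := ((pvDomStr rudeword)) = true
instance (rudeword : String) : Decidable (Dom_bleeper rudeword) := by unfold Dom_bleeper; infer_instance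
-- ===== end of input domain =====

-- B replaces A's loop of whole-string str.replace calls with one per-character map (asymptotically faster).

-- string.punctuation
def pvPunct : List Char := "!\"#$%&'()*+,-./:;<=>?@[\\]^_`{|}~".toList

-- ===== PORT A =====
-- the for-loop iterates over the ORIGINAL string's characters (Python binds the iterator
-- at loop entry), while `cur` and `pos` carry the rebound string and the running index.
def bleeperGo (cur : String) (pos : Int) : List Char → String
  | [] => cur
  | char :: rest =>
      let char' := if (pvPunct.contains char) = false then '*' else char
      let cur' := match PySem.Str.pyGet? cur pos with
        | some t => PySem.Str.replace cur (String.ofList [t]) (String.ofList [char'])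
        | none => cur   -- unreachable: pos stays in range (str.replace preserves the length here)
      bleeperGo cur' (pos + 1) rest

def bleeper (rudeword : String) : String :=
  bleeperGo rudeword 0 rudeword.toList

-- ===== PORT B =====
def bleeper_alt (rudeword : String) : String :=
  String.ofList (rudeword.toList.map (fun c => if pvPunct.contains c then c else '*'))

-- ===== PRECONDITION & SPEC =====
def Spec_bleeper (rudeword : String) (out : String) : Prop := out = bleeper_alt rudeword
instance (rudeword : String) (out : String) : Decidable (Spec_bleeper rudeword out) := by unfold Spec_bleeper; infer_instance

-- ===== CLAIM (what is proved, stated in full; the proofs are below) =====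
def Claim_equal_bleeper : Prop := ∀ (rudeword : String), Dom_bleeper rudeword → Spec_bleeper rudeword (bleeper rudeword)

-- ===== LEMMAS AND PROOFS =====

-- the censoring map
def pvF (c : Char) : Char := if pvPunct.contains c then c else '*'

-- the state of the suffix: chars from ss (all non-punctuation) already replaced by '*'
def pvStar (ss : List Char) (c : Char) : Char := if ss.contains c then '*' else c

theorem pvStar_pos (ss : List Char) (c : Char) (h : ss.contains c = true) : pvStar ss c = '*' := by
  unfold pvStar; rw [h]; simp

theorem pvStar_neg (ss : List Char) (c : Char) (h : ss.contains c = false) : pvStar ss c = c := by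
  unfold pvStar; rw [h]; simp

theorem pvF_pos (c : Char) (h : pvPunct.contains c = true) : pvF c = c := by
  unfold pvF; rw [h]; simp

theorem pvF_neg (c : Char) (h : pvPunct.contains c = false) : pvF c = '*' := by
  unfold pvF; rw [h]; simp

theorem pv_contains_false {l : List Char} {c : Char} (h : ¬ l.contains c = true) :
    l.contains c = false := by
  cases hb : l.contains c
  · rfl
  · exact absurd hb h

-- Chars.replace with a single-character pattern is a pointwise map
theorem pv_go_single (o n : Char) :
    ∀ (l acc : List Char) (fuel : Nat), l.length ≤ fuel →
      PySem.Chars.replace.go [o] [n] fuel l acc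
        = acc.reverse ++ l.map (fun x => if x = o then n else x) := by
  intro l
  induction l with
  | nil =>
      intro acc fuel _
      cases fuel <;> simp [PySem.Chars.replace.go]
  | cons c t ih =>
      intro acc fuel hf
      cases fuel with
      | zero => simp at hf
      | succ fuel =>
        by_cases hc : c = o
        · subst hc
          have hpre : [c].isPrefixOf (c :: t) = true := by
            simp [List.isPrefixOf]
          simp only [PySem.Chars.replace.go, hpre, if_pos, List.length_cons, List.drop_succ_cons,
            List.length_nil, List.drop_zero]
          rw [ih _ fuel (by simpa using Nat.lt_succ_iff.mp (by simpa using hf))]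
          simp
        · have hpre : [o].isPrefixOf (c :: t) = false := by
            simp only [List.isPrefixOf, Bool.and_true]
            exact beq_eq_false_iff_ne.mpr (fun h => hc h.symm)
          simp only [PySem.Chars.replace.go, hpre]
          rw [ih _ fuel (by simpa using Nat.lt_succ_iff.mp (by simpa using hf))]
          simp [hc]

theorem pv_replace_single (l : List Char) (o n : Char) :
    PySem.Chars.replace l [o] [n] = l.map (fun x => if x = o then n else x) := by
  have h : ([o] : List Char).isEmpty = false := rfl
  rw [PySem.Chars.replace, h]
  simpa using pv_go_single o n l [] l.length le_rfl

-- the loop invariant: cur = censored prefix ++ suffix starred on ss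
theorem pv_go_inv :
    ∀ (suf pre ss : List Char),
      (∀ x ∈ ss, pvPunct.contains x = false) →
      bleeperGo (String.ofList (pre.map pvF ++ suf.map (pvStar ss))) (pre.length : Int) suf
        = String.ofList ((pre ++ suf).map pvF) := by
  intro suf
  induction suf with
  | nil => intro pre ss _; simp [bleeperGo]
  | cons c rest ih =>
      intro pre ss hss
      have hlen : (pre.map pvF).length = pre.length := by simp
      have hget :
          PySem.Str.pyGet? (String.ofList (pre.map pvF ++ (c :: rest).map (pvStar ss)))
            (pre.length : Int) = some (pvStar ss c) := by
        simp only [PySem.Str.pyGet?, PySem.Chars.pyGet?, List.map_cons]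
        rw [String.toList_ofList, ← hlen]
        exact PySem.List.pyGet?_append_length _ _ _
      have hcast : (pre.length : Int) + 1 = (((pre ++ [c]).length : Nat) : Int) := by simp
      by_cases hp : pvPunct.contains c = true
      · -- punctuation: char' = c, cur[pos] = c, and replacing c by c changes nothing
        have hcs : ss.contains c = false := by
          cases hb : ss.contains c
          · rfl
          · exfalso
            have h2 := hss c (by simpa using hb)
            rw [hp] at h2; cases h2
        have hstar : pvStar ss c = c := pvStar_neg ss c hcs
        have hchar : (if (pvPunct.contains c) = false then '*' else c) = c := by
          rw [hp]; simp
        have hid : (fun x : Char => if x = c then c else x) = id := by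
          funext x; split <;> simp_all
        simp only [bleeperGo, hchar, hget, hstar, PySem.Str.replace, String.toList_ofList,
          pv_replace_single, hid, List.map_id]
        have h1 : pre.map pvF ++ (c :: rest).map (pvStar ss)
            = (pre ++ [c]).map pvF ++ rest.map (pvStar ss) := by
          simp [hstar, pvF_pos c hp]
        rw [h1, hcast, ih (pre ++ [c]) ss hss]
        simp
      · -- non-punctuation: char' = '*'
        have hp' : pvPunct.contains c = false := pv_contains_false hp
        have hchar : (if (pvPunct.contains c) = false then '*' else c) = '*' := by
          rw [hp']; simp
        have hcstar : c ≠ '*' := by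
          intro h; rw [h] at hp'
          have hh : pvPunct.contains '*' = true := by decide
          rw [hh] at hp'; cases hp'
        by_cases hcs : ss.contains c = true
        · -- already starred earlier: cur[pos] = '*', replacing '*' by '*' changes nothing
          have hstar : pvStar ss c = '*' := pvStar_pos ss c hcs
          have hid : (fun x : Char => if x = '*' then '*' else x) = id := by
            funext x; split <;> simp_all
          simp only [bleeperGo, hchar, hget, hstar, PySem.Str.replace, String.toList_ofList,
            pv_replace_single, hid, List.map_id]
          have h1 : pre.map pvF ++ (c :: rest).map (pvStar ss)
              = (pre ++ [c]).map pvF ++ rest.map (pvStar ss) := by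
            simp [hstar, pvF_neg c hp']
          rw [h1, hcast, ih (pre ++ [c]) ss hss]
          simp
        · -- fresh non-punctuation char: replace c→'*' also stars later c's; grow ss by c
          have hcs' : ss.contains c = false := pv_contains_false hcs
          have hstar : pvStar ss c = c := pvStar_neg ss c hcs'
          have hss' : ∀ x ∈ (c :: ss), pvPunct.contains x = false := by
            intro x hx
            rcases List.mem_cons.mp hx with h | h
            · rw [h]; exact hp'
            · exact hss x h
          simp only [bleeperGo, hchar, hget, hstar, PySem.Str.replace, String.toList_ofList,
            pv_replace_single]
          have hmap : (pre.map pvF ++ (c :: rest).map (pvStar ss)).map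
                (fun x => if x = c then '*' else x)
              = pre.map pvF ++ pvF c :: rest.map (pvStar (c :: ss)) := by
            simp only [List.map_append, List.map_map, List.map_cons]
            have hpre2 : List.map ((fun x => if x = c then '*' else x) ∘ pvF) pre
                = List.map pvF pre := by
              apply List.map_congr_left
              intro x _
              simp only [Function.comp_apply]
              by_cases hx : pvPunct.contains x = true
              · rw [pvF_pos x hx]
                have hne : x ≠ c := by intro h; rw [h, hp'] at hx; cases hx
                rw [if_neg hne]
              · rw [pvF_neg x (pv_contains_false hx), if_neg (Ne.symm hcstar)]
            have hhead : (if pvStar ss c = c then '*' else pvStar ss c) = pvF c := by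
              rw [hstar, if_pos rfl, pvF_neg c hp']
            have htail : List.map ((fun x => if x = c then '*' else x) ∘ pvStar ss) rest
                = List.map (pvStar (c :: ss)) rest := by
              apply List.map_congr_left
              intro x _
              simp only [Function.comp_apply]
              by_cases hx : ss.contains x = true
              · rw [pvStar_pos ss x hx, if_neg (Ne.symm hcstar),
                  pvStar_pos _ x (by rw [List.contains_cons, hx, Bool.or_true])]
              · have hx' := pv_contains_false hx
                rw [pvStar_neg ss x hx']
                by_cases hxc : x = c
                · subst hxc
                  rw [if_pos rfl, pvStar_pos _ x (by simp)]
                · rw [if_neg hxc, pvStar_neg _ x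
                    (by simp only [List.contains_cons, hx', Bool.or_false, beq_eq_false_iff_ne]
                        exact hxc)]
            rw [hpre2, hhead, htail]
          rw [hmap, hcast]
          have hI := ih (pre ++ [c]) (c :: ss) hss'
          simpa using hI

-- ===== VERDICT (by name: the statement is the Claim_ definition above) =====
theorem bleeper_spec : Claim_equal_bleeper := by
  intro rudeword _
  unfold Spec_bleeper bleeper bleeper_alt
  have h := pv_go_inv rudeword.toList [] [] (by intro x hx; cases hx)
  simp only [List.map_nil, List.nil_append, List.length_nil, Nat.cast_zero] at h
  have hfun : pvStar [] = id := by funext x; rfl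
  rw [hfun, List.map_id, String.ofList_toList] at h
  rw [h]
  rfl
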